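-- pv_equiv track=rewrite | github.com/bodroman/goit-pnc-hw-02 | table_cipher/level_1/table_cipher_e_d.py | decrypt_table_cipher
-- ===== SOURCE A (Python) =====
-- def generate_table(key):
--     alphabet = "ABCDEFGHIJKLMNOPQRSTUVWXYZ"
--     key = "".join(sorted(set(key.upper()), key=key.upper().index))  # Видаляємо дублікати, зберегаємо порядок
--     table = key + "".join(c for c in alphabet if c not in key)  # Додаємо решту алфавіту
--     return [table[i:i + 5] for i in range(0, len(table), 5)]  # Розділяємо на рядки по 5 символів
--
-- def find_position(char, table):
--     for row_idx, row in enumerate(table):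
--         if char in row:
--             return row_idx, row.index(char)
--     return None
--
-- def decrypt_table_cipher(encrypted_text, key):
--     table = generate_table(key)
--     encrypted_text = encrypted_text.upper().replace(" ", "")
--     decrypted = ""
--
--     for char in encrypted_text:
--         if char.isalpha():
--             row, col = find_position(char, table)
--             decrypted += table[(row - 1) % 5][col]  # Переходимо на попередній рядок
--         else:
--             decrypted += char  # Неалфавітні символи без дешифрування
--
--     return decrypted
-- ===== SOURCE B (Python) =====
-- def decrypt_table_cipher(encrypted_text, key):
--     order = dict.fromkeys(key.upper())
--     flat = "".join(order) + "".join(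
--         c for c in "ABCDEFGHIJKLMNOPQRSTUVWXYZ" if c not in order)
--     sub = {ch: flat[((i // 5 - 1) % 5) * 5 + i % 5]
--            for i, ch in enumerate(flat) if ch.isalpha()}
--     return "".join(sub.get(c, c) for c in encrypted_text.upper().replace(" ", ""))
-- ===== Notes on version B (the rewrite author's own statement) =====
-- stated objective: faster
-- what changed: B drops the row table and the per-character table scan (find_position): it builds the flat table string once, precomputes a substitution dict mapping each letter to the cell one row up via index arithmetic ((i//5-1)%5)*5+i%5, and decrypts in a single flat lookup pass.
import Mathlib
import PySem

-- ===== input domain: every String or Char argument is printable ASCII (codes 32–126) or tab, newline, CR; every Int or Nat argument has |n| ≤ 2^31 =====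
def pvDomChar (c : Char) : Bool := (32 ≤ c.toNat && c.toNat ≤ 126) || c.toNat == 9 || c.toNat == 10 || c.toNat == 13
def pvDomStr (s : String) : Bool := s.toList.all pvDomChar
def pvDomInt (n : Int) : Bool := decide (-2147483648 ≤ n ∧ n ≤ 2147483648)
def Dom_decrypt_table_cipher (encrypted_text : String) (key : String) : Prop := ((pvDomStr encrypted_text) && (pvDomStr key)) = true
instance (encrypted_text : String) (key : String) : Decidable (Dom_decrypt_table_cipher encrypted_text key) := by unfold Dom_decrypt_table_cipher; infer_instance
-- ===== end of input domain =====

-- B replaces A's per-character table scan (find_position) by one precomputed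
-- substitution dict and index arithmetic on the flat table string (measured faster).

def pvAlphabet : List Char := "ABCDEFGHIJKLMNOPQRSTUVWXYZ".toList

-- ===== PORT A =====
-- generate_table(key): dedup key.upper() keeping first-occurrence order, append the
-- rest of the alphabet, split into rows of 5.  key.upper().index(c) never raises here
-- (c is drawn from set(key.upper())), so .getD 0 is unreachable.
def pvGenTable (key : List Char) : List (List Char) :=
  let up := PySem.Chars.upper key
  let k := PySem.List.sorted (PySem.Set.ofList up) (fun c => (PySem.List.index? up c).getD 0)
  let table := k ++ pvAlphabet.filter (fun c => !(k.contains c))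
  (PySem.List.pyRange 0 table.length 5).map
    (fun i => PySem.List.slice table (some i) (some (i + 5)))

-- find_position(char, table): scan rows with enumerate, return (row, row.index(char))
-- at the first row containing char.  row.index never raises when char ∈ row.
def pvFindPosition (c : Char) : List (List Char) → Nat → Option (Nat × Nat)
  | [], _ => none
  | row :: rest, idx =>
      if c ∈ row then some (idx, (PySem.List.index? row c).getD 0)
      else pvFindPosition c rest (idx + 1)

def decrypt_table_cipher (encrypted_text : String) (key : String) : String :=
  let table := pvGenTable key.toList
  let text := PySem.Chars.replace (PySem.Chars.upper encrypted_text.toList) [' '] []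
  String.ofList <| text.foldl (fun acc ch =>
    if PySem.Chars.isalpha ch then
      match pvFindPosition ch table 0 with
      | some (row, col) =>
          acc ++ [PySem.List.pyGetD
                    (PySem.List.pyGetD table (PySem.Int.mod ((row : Int) - 1) 5) [])
                    (col : Int) ' ']
      -- unreachable: after upper() an alpha char is A–Z, and A–Z ⊆ table
      -- (in Python find_position would return None and the unpacking would raise)
      | none => acc
    else acc ++ [ch]) []

-- ===== PORT B =====
-- flat table string: dict.fromkeys dedup of key.upper(), then the rest of the alphabet
def pvFlat (key : List Char) : List Char :=
  let order := PySem.List.dedup (PySem.Chars.upper key)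
  order ++ pvAlphabet.filter (fun c => !(order.contains c))

-- {ch: flat[((i//5-1)%5)*5 + i%5] for i, ch in enumerate(flat) if ch.isalpha()}
-- the index is always in range (rows 0..4 are full), so the ' ' default is unreachable
def pvSub (flat : List Char) : PySem.Dict Char Char :=
  ((PySem.List.enumerate flat).filter (fun p => PySem.Chars.isalpha p.2)).foldl
    (fun d p => d.insert p.2
      (PySem.List.pyGetD flat
        (PySem.Int.mod (PySem.Int.floordiv p.1 5 - 1) 5 * 5 + PySem.Int.mod p.1 5) ' '))
    PySem.Dict.empty

def decrypt_table_cipher_alt (encrypted_text : String) (key : String) : String :=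
  let flat := pvFlat key.toList
  let sub := pvSub flat
  String.ofList <|
    (PySem.Chars.replace (PySem.Chars.upper encrypted_text.toList) [' '] []).map
      (fun c => sub.getD c c)

-- ===== PRECONDITION & SPEC =====
def Spec_decrypt_table_cipher (encrypted_text : String) (key : String) (out : String) : Prop := out = decrypt_table_cipher_alt encrypted_text key
instance (encrypted_text : String) (key : String) (out : String) : Decidable (Spec_decrypt_table_cipher encrypted_text key out) := by unfold Spec_decrypt_table_cipher; infer_instance

-- ===== CLAIM (what is proved, stated in full; the proofs are below) =====
def Claim_equal_decrypt_table_cipher : Prop := ∀ (encrypted_text : String) (key : String), Dom_decrypt_table_cipher encrypted_text key → Spec_decrypt_table_cipher encrypted_text key (decrypt_table_cipher encrypted_text key)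

-- ===== LEMMAS AND PROOFS =====

-- the chunk recursion behind [table[i:i+5] for i in range(0, len(table), 5)]
def pvChunks (l : List Char) : List (List Char) :=
  if l = [] then [] else l.take 5 :: pvChunks (l.drop 5)
termination_by l.length
decreasing_by
  rename_i h; simp only [List.length_drop]
  have : l.length ≠ 0 := fun h0 => h (List.eq_nil_of_length_eq_zero h0)
  omega

-- Char / ASCII basics ---------------------------------------------------------
theorem pv_char_le_iff (a b : Char) : a ≤ b ↔ a.toNat ≤ b.toNat := ge_iff_le

theorem pv_toNat_ofNat {n : Nat} (h : n < 55296) : (Char.ofNat n).toNat = n := by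
  simp only [Char.ofNat, dif_pos (Or.inl h : Nat.isValidChar n)]
  rfl

-- upper() produces no lowercase letters
theorem pv_upper_not_islower (c : Char) : PySem.Chars.islower (PySem.Chars.upperChar c) = false := by
  simp only [PySem.Chars.upperChar]
  split
  · rename_i h
    simp only [PySem.Chars.islower, Bool.and_eq_true, decide_eq_true_eq, pv_char_le_iff] at h
    have ha : ('a').toNat = 97 := rfl
    have hz : ('z').toNat = 122 := rfl
    rw [ha, hz] at h
    have hm : (Char.ofNat (c.toNat - 32)).toNat = c.toNat - 32 := pv_toNat_ofNat (by omega)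
    simp only [PySem.Chars.islower, Bool.and_eq_false_iff, decide_eq_false_iff_not, not_le,
      pv_char_le_iff, hm, hz]
    left
    rw [ha]
    omega
  · rename_i h; simpa using h

-- a non-lowercase alpha char is one of A..Z
theorem pv_alpha_mem_alphabet {c : Char} (hA : PySem.Chars.isalpha c = true)
    (hL : PySem.Chars.islower c = false) : c ∈ pvAlphabet := by
  simp only [PySem.Chars.isalpha, PySem.Chars.isupper, hL, Bool.or_false, Bool.and_eq_true,
    decide_eq_true_eq, pv_char_le_iff] at hA
  have hAt : ('A').toNat = 65 := rfl
  have hZt : ('Z').toNat = 90 := rfl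
  rw [hAt, hZt] at hA
  have h1 : (65:Nat) ≤ c.toNat := hA.1
  have h2 : c.toNat ≤ 90 := hA.2
  have hc : c = Char.ofNat c.toNat := (Char.ofNat_toNat c).symm
  interval_cases h : c.toNat <;> (rw [hc]; decide)

-- s.replace(p, "") with a one-char pattern is a filter ------------------------
theorem pv_replace_go_single (p : Char) :
    ∀ (fuel : Nat) (l acc : List Char), l.length ≤ fuel →
      PySem.Chars.replace.go [p] [] fuel l acc
        = acc.reverse ++ l.filter (fun c => !(c == p)) := by
  intro fuel
  induction fuel with
  | zero =>
    intro l acc h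
    have : l = [] := List.eq_nil_of_length_eq_zero (Nat.le_zero.mp h)
    subst this; simp [PySem.Chars.replace.go]
  | succ n ih =>
    intro l acc h
    cases l with
    | nil => simp [PySem.Chars.replace.go]
    | cons c t =>
      rw [PySem.Chars.replace.go]
      by_cases hc : c = p
      · subst hc
        have hpre : List.isPrefixOf [c] (c :: t) = true := by simp [List.isPrefixOf]
        simp only [hpre, if_pos, List.length_cons, List.length_nil, Nat.zero_add,
          List.drop_succ_cons, List.drop_zero, List.reverse_nil, List.nil_append]
        rw [ih t acc (Nat.succ_le_succ_iff.mp h)]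
        simp
      · have hpre : List.isPrefixOf [p] (c :: t) = false := by
          simp [List.isPrefixOf]
          exact fun h' => absurd h'.symm hc
        simp only [hpre, Bool.false_eq_true, if_neg, not_false_iff]
        rw [ih t (c :: acc) (Nat.succ_le_succ_iff.mp h)]
        simp [hc]

theorem pv_replace_single (p : Char) (s : List Char) :
    PySem.Chars.replace s [p] [] = s.filter (fun c => !(c == p)) := by
  rw [PySem.Chars.replace]
  simp only [List.isEmpty_cons, if_neg, Bool.false_eq_true, not_false_iff]
  rw [pv_replace_go_single p s.length s [] le_rfl]
  simp

-- sorted(set(l), key=l.index) is first-occurrence dedup -----------------------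
theorem pv_index?_lt_length {l : List Char} {c : Char} (h : c ∈ l) :
    ∃ j, PySem.List.index? l c = some j ∧ j < l.length := by
  have hs : (PySem.List.index? l c).isSome := (PySem.List.index?_isSome_iff l c).mpr h
  obtain ⟨j, hj⟩ := Option.isSome_iff_exists.mp hs
  obtain ⟨hlt, _, _⟩ := PySem.List.getElem_of_index?_eq_some hj
  exact ⟨j, hj, hlt⟩

theorem pv_ofList_pairwise_index (l : List Char) :
    (PySem.Set.ofList l).Pairwise
      (fun a b => (PySem.List.index? l a).getD 0 ≤ (PySem.List.index? l b).getD 0) := by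
  induction l using List.reverseRecOn with
  | nil => simp [PySem.Set.ofList_nil]
  | append_singleton xs x ih =>
    rw [PySem.Set.ofList_append_singleton]
    by_cases hx : x ∈ PySem.Set.ofList xs
    · rw [PySem.Set.add_of_mem hx]
      refine ih.imp_of_mem ?_
      intro a b ha hb hab
      have ha' : a ∈ xs := (PySem.Set.mem_ofList xs a).mp ha
      have hb' : b ∈ xs := (PySem.Set.mem_ofList xs b).mp hb
      rw [PySem.List.index?_append_of_mem _ ha', PySem.List.index?_append_of_mem _ hb']
      exact hab
    · rw [PySem.Set.add_of_not_mem hx]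
      rw [List.pairwise_append]
      refine ⟨?_, List.pairwise_singleton _ _, ?_⟩
      · refine ih.imp_of_mem ?_
        intro a b ha hb hab
        have ha' : a ∈ xs := (PySem.Set.mem_ofList xs a).mp ha
        have hb' : b ∈ xs := (PySem.Set.mem_ofList xs b).mp hb
        rw [PySem.List.index?_append_of_mem _ ha', PySem.List.index?_append_of_mem _ hb']
        exact hab
      · intro a ha b hb
        rw [List.mem_singleton] at hb; subst hb
        have ha' : a ∈ xs := (PySem.Set.mem_ofList xs a).mp ha
        have hbx : b ∉ xs := fun h => hx ((PySem.Set.mem_ofList xs b).mpr h)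
        rw [PySem.List.index?_append_of_mem _ ha',
          PySem.List.index?_append_singleton_self xs b hbx]
        obtain ⟨j, hj, hlt⟩ := pv_index?_lt_length ha'
        rw [hj]
        simpa using Nat.le_of_lt hlt

theorem pv_sorted_set_index (l : List Char) :
    PySem.List.sorted (PySem.Set.ofList l) (fun c => (PySem.List.index? l c).getD 0)
      = PySem.Set.ofList l :=
  PySem.List.sorted_eq_self_of_pairwise _ _ (pv_ofList_pairwise_index l)

-- facts about the flat table string -------------------------------------------
theorem pv_alphabet_nodup : pvAlphabet.Nodup := by decide

theorem pv_flat_nodup (key : List Char) : (pvFlat key).Nodup := by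
  unfold pvFlat
  refine List.Nodup.append (PySem.List.nodup_dedup _) (pv_alphabet_nodup.filter _) ?_
  intro a ha hb
  have hcf := List.of_mem_filter hb
  simp only [Bool.not_eq_true'] at hcf
  rw [← List.contains_iff_mem] at ha
  rw [hcf] at ha
  exact Bool.false_ne_true ha

theorem pv_mem_flat (key : List Char) {c : Char} (h : c ∈ pvAlphabet) : c ∈ pvFlat key := by
  unfold pvFlat
  by_cases hc : c ∈ PySem.List.dedup (PySem.Chars.upper key)
  · exact List.mem_append_left _ hc
  · refine List.mem_append_right _ (List.mem_filter.mpr ⟨h, ?_⟩)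
    simpa [PySem.List.mem_dedup] using hc

theorem pv_flat_len (key : List Char) : 26 ≤ (pvFlat key).length := by
  have hsub : pvAlphabet ⊆ pvFlat key := fun a ha => pv_mem_flat key ha
  calc (26:Nat) = pvAlphabet.toFinset.card := by decide
    _ ≤ (pvFlat key).toFinset.card :=
        Finset.card_le_card (by intro a ha; simp only [List.mem_toFinset] at *; exact hsub ha)
    _ ≤ (pvFlat key).length := List.toFinset_card_le _

-- A's table is the chunking of the flat string --------------------------------
theorem pv_slice5 (xs : List Char) (a : Nat) :
    PySem.List.slice xs (some (a : Int)) (some ((a : Int) + 5)) = (xs.drop a).take 5 := by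
  rw [show ((a:Int) + 5) = (a:Int) + ((5:Nat):Int) from by push_cast; ring,
    PySem.List.slice_natCast_add]

theorem pv_rows_eq_chunks_aux (n : Nat) : ∀ (xs : List Char), xs.length ≤ n →
    (PySem.List.pyRange 0 (xs.length : Int) 5).map
      (fun i => PySem.List.slice xs (some i) (some (i + 5))) = pvChunks xs := by
  induction n with
  | zero =>
    intro xs h
    have : xs = [] := List.eq_nil_of_length_eq_zero (Nat.le_zero.mp h)
    subst this
    rw [pvChunks]
    simp [PySem.List.pyRange_of_pos 0 0 (by norm_num : (0:Int) < 5)]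
  | succ n ih =>
    intro xs h
    by_cases hxs : xs = []
    · subst hxs
      rw [pvChunks]
      simp [PySem.List.pyRange_of_pos 0 0 (by norm_num : (0:Int) < 5)]
    · have hlen : 0 < xs.length := List.length_pos_of_ne_nil hxs
      rw [pvChunks, if_neg hxs]
      rw [PySem.List.pyRange_of_pos 0 (xs.length : Int) (by norm_num : (0:Int) < 5)]
      rw [if_pos (by exact_mod_cast hlen)]
      have hnum : (((xs.length : Int) - 0 + 5 - 1) / 5).toNat = (xs.length + 4) / 5 := by
        omega
      rw [hnum]
      have hpos : 0 < (xs.length + 4) / 5 := by omega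
      obtain ⟨m, hm⟩ : ∃ m, (xs.length + 4) / 5 = m + 1 := ⟨_, (Nat.succ_pred_eq_of_pos hpos).symm⟩
      rw [hm, List.range_succ_eq_map]
      simp only [List.map_cons, List.map_map]
      congr 1
      · -- head row
        rw [show ((0:Int) + 5 * ((Nat.cast (0:Nat)):Int)) = ((0:Nat):Int) from by norm_num]
        rw [pv_slice5 xs 0]
        simp
      · -- remaining rows
        rw [← ih (xs.drop 5) (by simp only [List.length_drop]; omega)]
        rw [PySem.List.pyRange_of_pos 0 ((xs.drop 5).length : Int) (by norm_num : (0:Int) < 5)]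
        simp only [List.length_drop]
        by_cases h5 : xs.length ≤ 5
        · have hneg : ¬ ((0:Int) < ((xs.length - 5 : Nat) : Int)) := by
            omega
          rw [if_neg hneg]
          have : m = 0 := by omega
          subst this
          simp
        · rw [not_le] at h5
          rw [if_pos (by exact_mod_cast Nat.sub_pos_of_lt h5)]
          have hnum2 : ((((xs.length - 5 : Nat) : Int) - 0 + 5 - 1) / 5).toNat = m := by
            omega
          rw [hnum2, List.map_map]
          apply List.map_congr_left
          intro k hk
          simp only [Function.comp_apply]
          have e1 : ((0:Int) + 5 * (((Nat.succ k):Nat):Int)) = ((5*k+5 : Nat) : Int) := by push_cast; ring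
          have e3 : ((0:Int) + 5 * ((k:Nat):Int)) = ((5*k : Nat) : Int) := by push_cast; ring
          rw [e1, e3, pv_slice5, pv_slice5, List.drop_drop]
          congr 2
          omega

theorem pv_rows_eq_chunks (xs : List Char) :
    (PySem.List.pyRange 0 (xs.length : Int) 5).map
      (fun i => PySem.List.slice xs (some i) (some (i + 5))) = pvChunks xs :=
  pv_rows_eq_chunks_aux xs.length xs le_rfl

theorem pv_gen_table_eq (key : List Char) : pvGenTable key = pvChunks (pvFlat key) := by
  unfold pvGenTable
  simp only []
  rw [pv_sorted_set_index]
  have : pvFlat key = PySem.Set.ofList (PySem.Chars.upper key)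
      ++ pvAlphabet.filter (fun c => !(List.contains (PySem.Set.ofList (PySem.Chars.upper key)) c)) := by
    unfold pvFlat
    simp only [PySem.List.dedup_eq_ofList]
  rw [← this, pv_rows_eq_chunks]

-- find_position over the chunked table ----------------------------------------
theorem pv_chunks_getElem? (j : Nat) : ∀ (xs : List Char), 5 * j < xs.length →
    (pvChunks xs)[j]? = some ((xs.drop (5 * j)).take 5) := by
  induction j with
  | zero =>
    intro xs h
    have hxs : xs ≠ [] := by intro h0; subst h0; simp at h
    rw [pvChunks, if_neg hxs]
    simp
  | succ j ih =>
    intro xs h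
    have hxs : xs ≠ [] := by intro h0; subst h0; simp at h
    rw [pvChunks, if_neg hxs]
    rw [List.getElem?_cons_succ]
    rw [ih (xs.drop 5) (by simp only [List.length_drop]; omega)]
    rw [List.drop_drop, show 5 + 5 * j = 5 * (j+1) from by ring]

theorem pv_findPosition_aux (n : Nat) : ∀ (xs : List Char) (c : Char) (i k : Nat),
    xs.length ≤ n → PySem.List.index? xs c = some i →
    pvFindPosition c (pvChunks xs) k = some (k + i / 5, i % 5) := by
  induction n with
  | zero =>
    intro xs c i k hn h
    have : xs = [] := List.eq_nil_of_length_eq_zero (Nat.le_zero.mp hn)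
    subst this
    simp [PySem.List.index?_eq_idxOf?] at h
  | succ n ih =>
    intro xs c i k hn h
    obtain ⟨pre, suf, hxs, hlen, hmem⟩ := (PySem.List.index?_eq_some_iff xs c i).mp h
    obtain ⟨hi, hget, hfirst⟩ := PySem.List.getElem_of_index?_eq_some h
    have hxsne : xs ≠ [] := by intro h0; subst h0; simp at hi
    rw [pvChunks, if_neg hxsne, pvFindPosition]
    by_cases h5 : i < 5
    · have hmemtake : c ∈ xs.take 5 := by
        have hlt : i < (xs.take 5).length := by simp; omega
        have : (xs.take 5)[i] = c := by rw [List.getElem_take]; exact hget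
        exact this ▸ List.getElem_mem hlt
      rw [if_pos hmemtake]
      have htake : xs.take 5 = pre ++ c :: suf.take (5 - i - 1) := by
        rw [hxs, List.take_append, List.take_of_length_le (by omega)]
        congr 1
        rw [show 5 - pre.length = (5 - i - 1) + 1 by omega]
        simp
      have hidx : PySem.List.index? (xs.take 5) c = some i := by
        rw [htake]
        exact (PySem.List.index?_eq_some_iff _ c i).mpr ⟨pre, _, rfl, hlen, hmem⟩
      rw [hidx]
      simp only [Option.getD_some]
      congr 2
      · omega
      · omega
    · have hnotmem : c ∉ xs.take 5 := by
        intro hmem5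
        obtain ⟨j, hj, hjc⟩ := List.mem_iff_getElem.mp hmem5
        have : xs[j]'(by simp at hj; omega) = c := by rw [← List.getElem_take]; exact hjc
        exact hfirst j (by simp at hj; omega) this
      rw [if_neg hnotmem]
      have hdrop : PySem.List.index? (xs.drop 5) c = some (i - 5) := by
        have hd : xs.drop 5 = pre.drop 5 ++ c :: suf := by
          rw [hxs, List.drop_append]
          congr 1
          rw [show 5 - pre.length = 0 by omega]
          simp
        rw [hd]
        refine (PySem.List.index?_eq_some_iff _ c (i-5)).mpr ⟨pre.drop 5, suf, rfl, by simp; omega, ?_⟩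
        intro hc
        exact hmem (List.drop_subset _ _ hc)
      rw [ih (xs.drop 5) c (i-5) (k+1) (by simp only [List.length_drop]; omega) hdrop]
      congr 2
      · omega
      · omega

-- the table value both programs compute for an alpha char ---------------------
-- index of the decrypted char in the flat string
def pvTgt (i : Nat) : Nat := (PySem.Int.mod ((i / 5 : Nat) - 1) 5).toNat * 5 + i % 5

theorem pv_tgt_lt (key : List Char) (i : Nat) : pvTgt i < (pvFlat key).length := by
  have h1 : 0 ≤ PySem.Int.mod ((i / 5 : Nat) - 1) 5 := PySem.Int.mod_nonneg _ (by norm_num)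
  have h2 : PySem.Int.mod ((i / 5 : Nat) - 1) 5 < 5 := PySem.Int.mod_lt _ (by norm_num)
  have := pv_flat_len key
  unfold pvTgt
  omega

theorem pv_a_val (key : List Char) (i : Nat) (hi : i < (pvFlat key).length) :
    PySem.List.pyGetD
        (PySem.List.pyGetD (pvChunks (pvFlat key)) (PySem.Int.mod (((i / 5 : Nat) : Int) - 1) 5) [])
        ((i % 5 : Nat) : Int) ' '
      = (pvFlat key)[pvTgt i]'(pv_tgt_lt key i) := by
  have h1 : 0 ≤ PySem.Int.mod (((i / 5 : Nat) : Int) - 1) 5 := PySem.Int.mod_nonneg _ (by norm_num)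
  have h2 : PySem.Int.mod (((i / 5 : Nat) : Int) - 1) 5 < 5 := PySem.Int.mod_lt _ (by norm_num)
  set m : Int := PySem.Int.mod (((i / 5 : Nat) : Int) - 1) 5 with hmdef
  have hlen := pv_flat_len key
  have hrow : (pvChunks (pvFlat key))[m.toNat]? = some (((pvFlat key).drop (5 * m.toNat)).take 5) :=
    pv_chunks_getElem? m.toNat (pvFlat key) (by omega)
  rw [PySem.List.pyGetD_of_nonneg _ _ h1]
  rw [List.getD_eq_getElem?_getD, hrow, Option.getD_some]
  rw [PySem.List.pyGetD_of_nonneg _ _ (by positivity)]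
  have hrowlen : (((pvFlat key).drop (5 * m.toNat)).take 5).length = 5 := by
    simp only [List.length_take, List.length_drop]
    omega
  have hlt : ((i % 5 : Nat) : Int).toNat < (((pvFlat key).drop (5 * m.toNat)).take 5).length := by
    rw [hrowlen, Int.toNat_natCast]
    omega
  rw [List.getD_eq_getElem?_getD, List.getElem?_eq_getElem hlt, Option.getD_some]
  simp only [Int.toNat_natCast]
  rw [List.getElem_take, List.getElem_drop]
  congr 1
  unfold pvTgt
  omega

-- B's substitution dict --------------------------------------------------------
theorem pv_sub_items (key : List Char) :
    (pvSub (pvFlat key)).items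
      = ((PySem.List.enumerate (pvFlat key)).filter (fun p => PySem.Chars.isalpha p.2)).map
          (fun p => (p.2, PySem.List.pyGetD (pvFlat key)
            (PySem.Int.mod (PySem.Int.floordiv p.1 5 - 1) 5 * 5 + PySem.Int.mod p.1 5) ' ')) := by
  unfold pvSub
  rw [PySem.Dict.items_foldl_insert_fresh _ _ _ _
    (fun a _ => rfl)
    ?_]
  · rfl
  · -- the keys are distinct: they form a sublist of the Nodup flat string
    have hsub : (((PySem.List.enumerate (pvFlat key)).filter
        (fun p => PySem.Chars.isalpha p.2)).map (fun p : Int × Char => p.2)).Sublist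
        ((PySem.List.enumerate (pvFlat key)).map (fun p : Int × Char => p.2)) :=
      List.filter_sublist.map _
    have : ((PySem.List.enumerate (pvFlat key)).map (fun p : Int × Char => p.2)) = pvFlat key :=
      PySem.List.map_snd_enumerate _ _
    exact (this ▸ hsub).nodup (pv_flat_nodup key)

theorem pv_sub_keys_nodup (key : List Char) : (pvSub (pvFlat key)).keys.Nodup := by
  have h : (pvSub (pvFlat key)).keys = (pvSub (pvFlat key)).items.map (fun p => p.1) := rfl
  rw [h, pv_sub_items, List.map_map]
  have hsub : (((PySem.List.enumerate (pvFlat key)).filter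
      (fun p => PySem.Chars.isalpha p.2)).map (fun p : Int × Char => p.2)).Sublist
      ((PySem.List.enumerate (pvFlat key)).map (fun p : Int × Char => p.2)) :=
    List.filter_sublist.map _
  have he : ((PySem.List.enumerate (pvFlat key)).map (fun p : Int × Char => p.2)) = pvFlat key :=
    PySem.List.map_snd_enumerate _ _
  exact (he ▸ hsub).nodup (pv_flat_nodup key)

theorem pv_sub_getD_alpha (key : List Char) {c : Char} {i : Nat}
    (hA : PySem.Chars.isalpha c = true)
    (h : PySem.List.index? (pvFlat key) c = some i) :
    (pvSub (pvFlat key)).getD c c = (pvFlat key)[pvTgt i]'(pv_tgt_lt key i) := by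
  obtain ⟨hi, hget, _⟩ := PySem.List.getElem_of_index?_eq_some h
  have hmem : ((i : Int), c) ∈ PySem.List.enumerate (pvFlat key) := by
    rw [PySem.List.mem_enumerate_iff]
    exact ⟨i, hi, by rw [hget]; simp⟩
  have hmemf : ((i : Int), c) ∈ (PySem.List.enumerate (pvFlat key)).filter
      (fun p => PySem.Chars.isalpha p.2) := List.mem_filter.mpr ⟨hmem, hA⟩
  have hitem : (c, PySem.List.pyGetD (pvFlat key)
      (PySem.Int.mod (PySem.Int.floordiv ((i : Int)) 5 - 1) 5 * 5 + PySem.Int.mod ((i : Int)) 5) ' ')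
      ∈ (pvSub (pvFlat key)).items := by
    rw [pv_sub_items]
    exact List.mem_map.mpr ⟨((i : Int), c), hmemf, rfl⟩
  rw [PySem.Dict.getD_of_mem_items _ hitem (pv_sub_keys_nodup key)]
  -- evaluate B's index expression
  have e5 : (5 : Int) = ((5 : Nat) : Int) := rfl
  have hfd : PySem.Int.floordiv ((i : Int)) 5 = ((i / 5 : Nat) : Int) := by
    rw [e5, PySem.Int.floordiv_natCast]
  have hmd : PySem.Int.mod ((i : Int)) 5 = ((i % 5 : Nat) : Int) := by
    rw [e5, PySem.Int.mod_natCast]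
  rw [hfd, hmd]
  have h1 : 0 ≤ PySem.Int.mod (((i / 5 : Nat) : Int) - 1) 5 := PySem.Int.mod_nonneg _ (by norm_num)
  have h2 : PySem.Int.mod (((i / 5 : Nat) : Int) - 1) 5 < 5 := PySem.Int.mod_lt _ (by norm_num)
  have hlt : PySem.Int.mod (((i / 5 : Nat) : Int) - 1) 5 * 5 + ((i % 5 : Nat) : Int)
      < ((pvFlat key).length : Int) := by
    have := pv_flat_len key
    have : (26 : Int) ≤ ((pvFlat key).length : Int) := by exact_mod_cast this
    have hm5 : ((i % 5 : Nat) : Int) < 5 := by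
      have : i % 5 < 5 := Nat.mod_lt _ (by norm_num)
      exact_mod_cast this
    nlinarith
  rw [PySem.List.pyGetD_eq_getElem _ _ (by positivity) hlt]
  congr 1
  unfold pvTgt
  omega

theorem pv_sub_getD_not_alpha (key : List Char) {c : Char}
    (hA : PySem.Chars.isalpha c = false) :
    (pvSub (pvFlat key)).getD c c = c := by
  apply PySem.Dict.getD_of_not_contains
  rw [Bool.eq_false_iff]
  intro hcont
  have hk := (PySem.Dict.contains_iff_mem_keys _ _).mp hcont
  have hkeys : (pvSub (pvFlat key)).keys = (pvSub (pvFlat key)).items.map (fun p => p.1) := rfl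
  rw [hkeys, pv_sub_items, List.map_map] at hk
  obtain ⟨p, hp, hpc⟩ := List.mem_map.mp hk
  have := List.of_mem_filter hp
  simp only [Function.comp_apply] at hpc
  rw [hpc] at this
  rw [this] at hA
  simp at hA

-- ===== VERDICT (by name: the statement is the Claim_ definition above) =====
theorem decrypt_table_cipher_spec : Claim_equal_decrypt_table_cipher := by
  intro e key _hdom
  unfold Spec_decrypt_table_cipher decrypt_table_cipher decrypt_table_cipher_alt
  dsimp only
  rw [pv_gen_table_eq]
  congr 1
  rw [pv_replace_single]
  rw [PySem.List.foldl_congr_mem _ _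
    (fun acc ch => acc ++ [(pvSub (pvFlat key.toList)).getD ch ch]) [] ?_]
  · rw [PySem.List.foldl_append_singleton_eq_map]
    simp
  · intro acc ch hch
    dsimp only
    have hup : ch ∈ PySem.Chars.upper e.toList := List.mem_of_mem_filter hch
    rw [PySem.Chars.upper.eq_def] at hup
    obtain ⟨x, _, hx⟩ := List.mem_map.mp hup
    have hL : PySem.Chars.islower ch = false := hx ▸ pv_upper_not_islower x
    by_cases hA : PySem.Chars.isalpha ch = true
    · rw [if_pos hA]
      have hmemF : ch ∈ pvFlat key.toList := pv_mem_flat _ (pv_alpha_mem_alphabet hA hL)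
      obtain ⟨i, hidx, hilt⟩ := pv_index?_lt_length hmemF
      rw [pv_findPosition_aux (pvFlat key.toList).length _ ch i 0 le_rfl hidx]
      simp only [Nat.zero_add]
      rw [pv_a_val key.toList i hilt]
      rw [pv_sub_getD_alpha key.toList hA hidx]
    · rw [if_neg hA]
      rw [pv_sub_getD_not_alpha key.toList (Bool.of_not_eq_true hA)]
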